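-- pv_equiv track=rewrite | github.com/yonasman/DSA-Practice | A2SV.py | minSteps
-- ===== SOURCE A (Python) =====
-- def minSteps(s,t):
--     hashMapS = {}
--     hashMapT = {}
--     minSteps = 0
--     for c in s:
--         hashMapS[c] = hashMapS.get(c,0) + 1
--     for c in t:
--         hashMapT[c] = hashMapT.get(c,0) + 1
--
--     for key in hashMapS:
--         if key in hashMapT:
--             minSteps += max(0, hashMapS[key] - hashMapT[key])
--         else:
--             minSteps += hashMapS[key]
--     return minSteps
-- ===== SOURCE B (Python) =====
-- def minSteps(s, t):
--     budget = {}
--     for c in t: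
--         budget[c] = budget.get(c, 0) + 1
--     steps = 0
--     for c in s:
--         if budget.get(c, 0) > 0:
--             budget[c] -= 1
--         else:
--             steps += 1
--     return steps
-- ===== Notes on version B (the rewrite author's own statement) =====
-- stated objective: alternative
-- what changed: B keeps only one frequency dict (t's consumable budget) and does a single greedy pass over s, decrementing the budget or counting a step per character, instead of building two maps and summing positive count differences over s's keys.
import Mathlib
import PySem

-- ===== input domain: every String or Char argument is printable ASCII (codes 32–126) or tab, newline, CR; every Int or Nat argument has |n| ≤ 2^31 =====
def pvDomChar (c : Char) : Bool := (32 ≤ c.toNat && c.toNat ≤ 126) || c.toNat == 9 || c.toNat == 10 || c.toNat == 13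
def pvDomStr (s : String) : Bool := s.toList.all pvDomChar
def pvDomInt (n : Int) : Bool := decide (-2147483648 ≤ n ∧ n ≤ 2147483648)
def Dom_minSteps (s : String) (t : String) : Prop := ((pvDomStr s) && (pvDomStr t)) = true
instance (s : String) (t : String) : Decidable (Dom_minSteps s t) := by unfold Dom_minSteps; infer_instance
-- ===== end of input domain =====

-- B keeps one frequency dict (t's budget) consumed in a single greedy pass over s, instead of two maps and a sum of positive differences; alternative decomposition, same O(|s|+|t|) cost.

-- ===== PORT A =====
def minSteps (s : String) (t : String) : Int :=
  let hashMapS := s.toList.foldl (fun d c => d.insert c (d.getD c 0 + 1)) PySem.Dict.empty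
  let hashMapT := t.toList.foldl (fun d c => d.insert c (d.getD c 0 + 1)) PySem.Dict.empty
  hashMapS.keys.foldl (fun acc key =>
    if hashMapT.contains key then
      acc + max 0 (hashMapS.getD key 0 - hashMapT.getD key 0)
    else
      acc + hashMapS.getD key 0) 0

-- ===== PORT B =====
-- the single consuming pass over s: steps counter plus the remaining budget dict
def minStepsAltGo : List Char → PySem.Dict Char Int → Int → Int
  | [], _, steps => steps
  | c :: rest, budget, steps =>
    if budget.getD c 0 > 0 then
      minStepsAltGo rest (budget.insert c (budget.getD c 0 - 1)) steps
    else
      minStepsAltGo rest budget (steps + 1)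

def minSteps_alt (s : String) (t : String) : Int :=
  let budget := t.toList.foldl (fun d c => d.insert c (d.getD c 0 + 1)) PySem.Dict.empty
  minStepsAltGo s.toList budget 0

-- ===== PRECONDITION & SPEC =====
def Spec_minSteps (s : String) (t : String) (out : Int) : Prop := out = minSteps_alt s t
instance (s : String) (t : String) (out : Int) : Decidable (Spec_minSteps s t out) := by unfold Spec_minSteps; infer_instance

-- ===== CLAIM (what is proved, stated in full; the proofs are below) =====
def Claim_equal_minSteps : Prop := ∀ (s : String) (t : String), Dom_minSteps s t → Spec_minSteps s t (minSteps s t)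

-- ===== LEMMAS AND PROOFS =====

-- B's consuming pass counts, for each character, its occurrences beyond the (positive part of) its budget
lemma minStepsAltGo_eq (U : Finset Char) (l : List Char) (hl : ∀ c ∈ l, c ∈ U)
    (d : PySem.Dict Char Int) (k : Int) :
    minStepsAltGo l d k
      = k + ∑ x ∈ U, max 0 ((l.count x : Int) - max (d.getD x 0) 0) := by
  induction l generalizing d k with
  | nil =>
      simp only [minStepsAltGo, List.count_nil]
      rw [Finset.sum_eq_zero]
      · ring
      · intro x _; omega
  | cons c rest ih =>
      have hc : c ∈ U := hl c (by simp)
      have hrest : ∀ x ∈ rest, x ∈ U := fun x hx => hl x (by simp [hx])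
      by_cases h : d.getD c 0 > 0
      · rw [minStepsAltGo, if_pos h, ih hrest]
        congr 1
        rw [← Finset.sum_erase_add _ _ hc, ← Finset.sum_erase_add _ _ hc]
        congr 1
        · apply Finset.sum_congr rfl
          intro x hx
          have hne : x ≠ c := Finset.ne_of_mem_erase hx
          rw [PySem.Dict.getD_insert_of_ne _ _ _ hne,
              List.count_cons_of_ne (Ne.symm hne)]
        · rw [PySem.Dict.getD_insert_self, List.count_cons_self]
          push_cast
          omega
      · rw [minStepsAltGo, if_neg h, ih hrest]
        rw [← Finset.sum_erase_add _ _ hc, ← Finset.sum_erase_add _ _ hc]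
        have hterms : ∀ x ∈ U.erase c,
            max 0 (((c :: rest).count x : Int) - max (d.getD x 0) 0)
              = max 0 ((rest.count x : Int) - max (d.getD x 0) 0) := by
          intro x hx
          rw [List.count_cons_of_ne (Ne.symm (Finset.ne_of_mem_erase hx))]
        rw [Finset.sum_congr rfl hterms, List.count_cons_self]
        push_cast
        omega

-- the common value: for every character of s, occurrences in s beyond those in t
lemma minSteps_alt_closed (s t : String) :
    minSteps_alt s t
      = ∑ x ∈ s.toList.toFinset, max 0 ((s.toList.count x : Int) - (t.toList.count x : Int)) := by
  rw [minSteps_alt]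
  rw [minStepsAltGo_eq s.toList.toFinset s.toList (fun c hc => List.mem_toFinset.mpr hc)]
  rw [zero_add]
  apply Finset.sum_congr rfl
  intro x _
  rw [PySem.Dict.getD_foldl_insert_add_one, PySem.Dict.getD_empty]
  have : (0 : Int) ≤ (t.toList.count x : Int) := Int.natCast_nonneg _
  omega

lemma minSteps_closed (s t : String) :
    minSteps s t
      = ∑ x ∈ s.toList.toFinset, max 0 ((s.toList.count x : Int) - (t.toList.count x : Int)) := by
  rw [minSteps]
  simp only [PySem.Dict.foldl_insert_getD_add_one_eq_counter]
  have hfold : (PySem.Dict.counter s.toList).keys.foldl (fun acc key =>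
      if (PySem.Dict.counter t.toList).contains key then
        acc + max 0 ((PySem.Dict.counter s.toList).getD key 0 - (PySem.Dict.counter t.toList).getD key 0)
      else
        acc + (PySem.Dict.counter s.toList).getD key 0) 0
      = ((PySem.Dict.counter s.toList).keys.map (fun key =>
          if (PySem.Dict.counter t.toList).contains key then
            max 0 ((PySem.Dict.counter s.toList).getD key 0 - (PySem.Dict.counter t.toList).getD key 0)
          else
            (PySem.Dict.counter s.toList).getD key 0)).sum := by
    rw [show (fun (acc : Int) key =>
      if (PySem.Dict.counter t.toList).contains key then
        acc + max 0 ((PySem.Dict.counter s.toList).getD key 0 - (PySem.Dict.counter t.toList).getD key 0)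
      else
        acc + (PySem.Dict.counter s.toList).getD key 0)
      = (fun (acc : Int) key => acc +
          (if (PySem.Dict.counter t.toList).contains key then
            max 0 ((PySem.Dict.counter s.toList).getD key 0 - (PySem.Dict.counter t.toList).getD key 0)
          else
            (PySem.Dict.counter s.toList).getD key 0)) from by
        funext acc key; split <;> rfl]
    rw [PySem.List.foldl_add, zero_add]
  rw [hfold]
  have hmap : ∀ key ∈ (PySem.Dict.counter s.toList).keys,
      (if (PySem.Dict.counter t.toList).contains key then
        max 0 ((PySem.Dict.counter s.toList).getD key 0 - (PySem.Dict.counter t.toList).getD key 0)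
      else
        (PySem.Dict.counter s.toList).getD key 0)
      = max 0 ((s.toList.count key : Int) - (t.toList.count key : Int)) := by
    intro key hkey
    rw [PySem.Dict.getD_counter, PySem.Dict.getD_counter]
    by_cases hmem : key ∈ t.toList
    · rw [if_pos]
      simp [PySem.Dict.contains_counter, hmem]
    · rw [if_neg]
      · have : t.toList.count key = 0 := List.count_eq_zero.mpr hmem
        rw [this]
        have : (0 : Int) ≤ (s.toList.count key : Int) := Int.natCast_nonneg _
        omega
      · simp [PySem.Dict.contains_counter, hmem]
  rw [List.map_congr_left hmap]
  have hnodup : (PySem.Dict.counter s.toList).keys.Nodup := PySem.Dict.nodup_keys_counter _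
  have hfin : (PySem.Dict.counter s.toList).keys.toFinset = s.toList.toFinset := by
    ext x
    simp [PySem.Dict.keys_counter, PySem.Set.mem_ofList]
  rw [← List.sum_toFinset _ hnodup, hfin]

-- ===== VERDICT (by name: the statement is the Claim_ definition above) =====
theorem minSteps_spec : Claim_equal_minSteps := by
  intro s t _
  unfold Spec_minSteps
  rw [minSteps_closed, minSteps_alt_closed]
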